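-- pv_equiv track=rewrite | github.com/Rupayaan/hybridChessAI | ChessAI-backend/engine.py | is_endgame
-- ===== SOURCE A (Python) =====
-- PIECE_VALUES = {
--     "p": 100, "n": 320, "b": 330, "r": 500, "q": 900, "k": 20000,
--     "P": 100, "N": 320, "B": 330, "R": 500, "Q": 900, "K": 20000,
-- }
--
-- def is_endgame(board):
--     """Detect endgame: no queens or queen + minor piece only."""
--     white_material = 0
--     black_material = 0
--     for row in board:
--         for piece in row:
--             if not piece:
--                 continue
--             p = piece.lower()
--             if p == "k":
--                 continue
--             val = PIECE_VALUES.get(p, 0)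
--             if piece.isupper():
--                 white_material += val
--             else:
--                 black_material += val
--     return white_material <= 1300 and black_material <= 1300
-- ===== SOURCE B (Python) =====
-- PIECE_VALUES = {
--     "p": 100, "n": 320, "b": 330, "r": 500, "q": 900, "k": 20000,
--     "P": 100, "N": 320, "B": 330, "R": 500, "Q": 900, "K": 20000,
-- }
--
-- def is_endgame(board):
--     """Detect endgame: no queens or queen + minor piece only."""
--     pieces = [p for row in board for p in row if p]
--     tally = {}
--     for p in pieces:
--         tally[p] = tally.get(p, 0) + 1
--     white_material = 0
--     black_material = 0
--     for piece, cnt in tally.items():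
--         low = piece.lower()
--         if low == "k":
--             continue
--         v = PIECE_VALUES.get(low, 0) * cnt
--         if piece.isupper():
--             white_material += v
--         else:
--             black_material += v
--     return white_material <= 1300 and black_material <= 1300
-- ===== Notes on version B (the rewrite author's own statement) =====
-- stated objective: alternative
-- what changed: Replaces A's fused per-cell accumulation with a two-phase algorithm: first build a frequency table (dict tally) of all non-empty cells, then make one pass over the distinct piece strings adding count*value per piece type.
import Mathlib
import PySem

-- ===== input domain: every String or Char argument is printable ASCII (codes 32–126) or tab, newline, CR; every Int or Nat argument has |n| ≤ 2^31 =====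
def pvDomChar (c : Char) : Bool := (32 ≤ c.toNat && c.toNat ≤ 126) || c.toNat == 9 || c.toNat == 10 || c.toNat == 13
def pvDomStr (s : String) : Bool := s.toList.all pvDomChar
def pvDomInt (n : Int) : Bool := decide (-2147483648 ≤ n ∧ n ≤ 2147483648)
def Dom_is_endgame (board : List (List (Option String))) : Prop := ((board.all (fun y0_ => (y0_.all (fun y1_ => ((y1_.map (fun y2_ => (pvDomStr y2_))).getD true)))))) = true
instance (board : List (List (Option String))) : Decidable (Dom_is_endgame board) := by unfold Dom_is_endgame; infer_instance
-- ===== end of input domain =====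

-- B builds a frequency table of the non-empty cells first, then sums count*value per distinct piece type; A fuses everything into one per-cell scan.

-- ===== PORT A =====
-- Python's str.isupper(): at least one cased character and no lowercase one (exact on the ASCII domain).
def pyStrIsupper (s : String) : Bool :=
  s.toList.any (fun c => PySem.Chars.isalpha c) && s.toList.all (fun c => !PySem.Chars.islower c)

def PIECE_VALUES : PySem.Dict String Int :=
  PySem.Dict.ofList [("p", 100), ("n", 320), ("b", 330), ("r", 500), ("q", 900), ("k", 20000),
                     ("P", 100), ("N", 320), ("B", 330), ("R", 500), ("Q", 900), ("K", 20000)]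

def is_endgame (board : List (List (Option String))) : Bool :=
  let st : Int × Int := board.foldl (fun acc row =>
    row.foldl (fun (acc : Int × Int) piece =>
      match piece with
      | none => acc
      | some s =>
        if s = "" then acc
        else
          let p := PySem.Str.lower s
          if p = "k" then acc
          else
            let val := PIECE_VALUES.getD p 0
            if pyStrIsupper s then (acc.1 + val, acc.2) else (acc.1, acc.2 + val)) acc) (0, 0)
  decide (st.1 ≤ 1300) && decide (st.2 ≤ 1300)

-- ===== PORT B =====
def is_endgame_alt (board : List (List (Option String))) : Bool :=
  let pieces : List String := board.flatMap (fun row =>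
    row.filterMap (fun c => match c with
      | none => none
      | some s => if s = "" then none else some s))
  let tally : PySem.Dict String Int :=
    pieces.foldl (fun d p => d.insert p (d.getD p 0 + 1)) PySem.Dict.empty
  let st : Int × Int := tally.items.foldl (fun (acc : Int × Int) kv =>
    let low := PySem.Str.lower kv.1
    if low = "k" then acc
    else
      let v := PIECE_VALUES.getD low 0 * kv.2
      if pyStrIsupper kv.1 then (acc.1 + v, acc.2) else (acc.1, acc.2 + v)) (0, 0)
  decide (st.1 ≤ 1300) && decide (st.2 ≤ 1300)

-- ===== PRECONDITION & SPEC =====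
def Spec_is_endgame (board : List (List (Option String))) (out : Bool) : Prop := out = is_endgame_alt board
instance (board : List (List (Option String))) (out : Bool) : Decidable (Spec_is_endgame board out) := by unfold Spec_is_endgame; infer_instance

-- ===== CLAIM (what is proved, stated in full; the proofs are below) =====
def Claim_equal_is_endgame : Prop := ∀ (board : List (List (Option String))), Dom_is_endgame board → Spec_is_endgame board (is_endgame board)

-- ===== LEMMAS AND PROOFS =====

-- single-piece contribution (white, black)
def pvG (s : String) : Int × Int :=
  if PySem.Str.lower s = "k" then (0, 0)
  else
    let val := PIECE_VALUES.getD (PySem.Str.lower s) 0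
    if pyStrIsupper s then (val, 0) else (0, val)

-- the cell filter B uses
def pvCell (c : Option String) : Option String :=
  match c with
  | none => none
  | some s => if s = "" then none else some s

def pvPieces (board : List (List (Option String))) : List String :=
  board.flatMap (fun row => row.filterMap pvCell)

lemma foldl_g_sum (l : List String) (a b : Int) :
    l.foldl (fun (acc : Int × Int) s => (acc.1 + (pvG s).1, acc.2 + (pvG s).2)) (a, b)
      = (a + (l.map (fun s => (pvG s).1)).sum, b + (l.map (fun s => (pvG s).2)).sum) := by
  induction l generalizing a b with
  | nil => simp
  | cons x t ih => simp [ih]; constructor <;> ring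

-- A's inner loop over a row equals the g-fold over the filtered row
lemma rowA (row : List (Option String)) (acc : Int × Int) :
    row.foldl (fun (acc : Int × Int) piece =>
      match piece with
      | none => acc
      | some s =>
        if s = "" then acc
        else
          let p := PySem.Str.lower s
          if p = "k" then acc
          else
            let val := PIECE_VALUES.getD p 0
            if pyStrIsupper s then (acc.1 + val, acc.2) else (acc.1, acc.2 + val)) acc
    = (row.filterMap pvCell).foldl
        (fun (acc : Int × Int) s => (acc.1 + (pvG s).1, acc.2 + (pvG s).2)) acc := by
  induction row generalizing acc with
  | nil => rfl
  | cons c t ih =>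
    cases c with
    | none => simpa [pvCell] using ih acc
    | some s =>
      by_cases hs : s = ""
      · simpa [pvCell, hs] using ih acc
      · by_cases hk : PySem.Str.lower s = "k"
        · simp [pvCell, hs, hk, pvG, List.foldl_cons, ih]
        · by_cases hu : pyStrIsupper s
          · simp [pvCell, hs, hk, hu, pvG, List.foldl_cons, ih]
          · simp [pvCell, hs, hk, hu, pvG, List.foldl_cons, ih]

lemma aOuter (board : List (List (Option String))) (acc : Int × Int) :
    board.foldl (fun acc row =>
      row.foldl (fun (acc : Int × Int) piece =>
        match piece with
        | none => acc
        | some s =>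
          if s = "" then acc
          else
            let p := PySem.Str.lower s
            if p = "k" then acc
            else
              let val := PIECE_VALUES.getD p 0
              if pyStrIsupper s then (acc.1 + val, acc.2) else (acc.1, acc.2 + val)) acc) acc
    = (pvPieces board).foldl
        (fun (acc : Int × Int) s => (acc.1 + (pvG s).1, acc.2 + (pvG s).2)) acc := by
  induction board generalizing acc with
  | nil => rfl
  | cons row t ih =>
    simp only [List.foldl_cons, pvPieces, List.flatMap_cons, List.foldl_append]
    rw [rowA]
    exact ih _

-- B's loop over the counter items, as sums over the distinct pieces
lemma foldl_items_sum (l : List (String × Int)) (a b : Int) :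
    l.foldl (fun (acc : Int × Int) kv =>
      let low := PySem.Str.lower kv.1
      if low = "k" then acc
      else
        let v := PIECE_VALUES.getD low 0 * kv.2
        if pyStrIsupper kv.1 then (acc.1 + v, acc.2) else (acc.1, acc.2 + v)) (a, b)
    = (a + (l.map (fun kv => (pvG kv.1).1 * kv.2)).sum,
       b + (l.map (fun kv => (pvG kv.1).2 * kv.2)).sum) := by
  induction l generalizing a b with
  | nil => simp
  | cons kv t ih =>
    by_cases hk : PySem.Str.lower kv.1 = "k"
    · simp [hk, pvG, ih]
    · by_cases hu : pyStrIsupper kv.1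
      · (simp [hk, hu, pvG, ih]; ring)
      · (simp [hk, hu, pvG, ih]; ring)

-- core resummation: summing h over l equals summing count*h over the distinct elements of l
lemma sum_count_dedup (l : List String) (h : String → Int) :
    ((PySem.Set.ofList l).map (fun k => h k * (l.count k : Int))).sum
      = (l.map h).sum := by
  have hnd : (PySem.Set.ofList l).Nodup := PySem.Set.nodup_ofList l
  have hfin : (PySem.Set.ofList l).toFinset = l.toFinset := by
    ext x
    simp [List.mem_toFinset, PySem.Set.mem_ofList]
  calc ((PySem.Set.ofList l).map (fun k => h k * (l.count k : Int))).sum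
      = ∑ k ∈ (PySem.Set.ofList l).toFinset, h k * (l.count k : Int) := by
        rw [List.sum_toFinset _ hnd]
    _ = ∑ k ∈ l.toFinset, h k * (l.count k : Int) := by rw [hfin]
    _ = (l.map h).sum := by
        rw [Finset.sum_list_map_count]
        refine Finset.sum_congr rfl (fun x _ => ?_)
        ring

-- ===== VERDICT (by name: the statement is the Claim_ definition above) =====
theorem is_endgame_spec : Claim_equal_is_endgame := by
  intro board _
  unfold Spec_is_endgame is_endgame is_endgame_alt
  rw [show (board.flatMap (fun row =>
        row.filterMap (fun c => match c with
          | none => none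
          | some s => if s = "" then none else some s))) = pvPieces board from rfl]
  simp only [aOuter, PySem.Dict.foldl_insert_getD_add_one_eq_counter, PySem.Dict.items_counter,
    foldl_g_sum, foldl_items_sum, List.map_map, Function.comp_def]
  rw [sum_count_dedup (pvPieces board) (fun s => (pvG s).1),
      sum_count_dedup (pvPieces board) (fun s => (pvG s).2)]
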